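-- pv_equiv track=rewrite | github.com/jake-albert/py-algs | c16/c16p09.py | my_sub
-- ===== SOURCE A (Python) =====
-- def my_sub(a,b):
--     """Returns the value of a - b.
--
--     Args:
--         a: An int.
--         b: An int.
--     """
--     min_val, max_val = min(a,b), max(a,b)
--     res = 0
--
--     change_val = 1 if a>b else -1
--     while min_val < max_val:
--         min_val += 1
--         res += change_val
--     return res
-- ===== SOURCE B (Python) =====
-- def my_sub(a, b):
--     """Returns the value of a - b.
--
--     Args:
--         a: An int.
--         b: An int.
--     """
--     return a - b
-- ===== Notes on version B (the rewrite author's own statement) =====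
-- stated objective: faster
-- what changed: Replaces the unit-counting while loop (incrementing min toward max while accumulating +/-1) with the closed-form expression a - b.
import Mathlib
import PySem

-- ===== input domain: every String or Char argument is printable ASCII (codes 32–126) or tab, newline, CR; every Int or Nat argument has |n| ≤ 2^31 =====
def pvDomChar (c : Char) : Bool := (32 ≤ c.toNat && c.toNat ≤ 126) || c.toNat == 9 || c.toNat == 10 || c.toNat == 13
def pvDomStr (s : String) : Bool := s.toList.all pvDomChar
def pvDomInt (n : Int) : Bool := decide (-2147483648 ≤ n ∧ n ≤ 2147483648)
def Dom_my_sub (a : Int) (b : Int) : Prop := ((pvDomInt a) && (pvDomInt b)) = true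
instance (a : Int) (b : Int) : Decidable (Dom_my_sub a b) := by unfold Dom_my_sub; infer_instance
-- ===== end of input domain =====

-- ===== PORT A =====
-- literal transliteration of A's while loop: state (min_val, res), step +1 / change_val
def mySubLoop (min_val max_val res change_val : Int) : Int :=
  if _h : min_val < max_val then
    mySubLoop (min_val + 1) max_val (res + change_val) change_val
  else res
termination_by (max_val - min_val).toNat
decreasing_by
  have : max_val - (min_val + 1) < max_val - min_val := by omega
  omega

def my_sub (a : Int) (b : Int) : Int :=
  let min_val := min a b
  let max_val := max a b
  let res : Int := 0
  let change_val : Int := if a > b then 1 else -1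
  mySubLoop min_val max_val res change_val

-- ===== PORT B =====
def my_sub_alt (a : Int) (b : Int) : Int := a - b

-- ===== PRECONDITION & SPEC =====
def Spec_my_sub (a : Int) (b : Int) (out : Int) : Prop := out = my_sub_alt a b
instance (a : Int) (b : Int) (out : Int) : Decidable (Spec_my_sub a b out) := by unfold Spec_my_sub; infer_instance

-- ===== CLAIM (what is proved, stated in full; the proofs are below) =====
def Claim_equal_my_sub : Prop := ∀ (a : Int) (b : Int), Dom_my_sub a b → Spec_my_sub a b (my_sub a b)

-- ===== LEMMAS AND PROOFS =====
theorem mySubLoop_eq (n : Nat) (mn mx res c : Int) (h : (mx - mn).toNat = n) :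
    mySubLoop mn mx res c = res + c * (mx - mn).toNat := by
  induction n generalizing mn res with
  | zero =>
    rw [mySubLoop]
    have : ¬ mn < mx := by omega
    simp [this, h]
  | succ k ih =>
    rw [mySubLoop]
    have hlt : mn < mx := by omega
    have hk : (mx - (mn + 1)).toNat = k := by omega
    simp only [hlt, dif_pos]
    rw [ih _ _ hk]
    have : ((mx - (mn+1)).toNat : Int) = (mx - mn).toNat - 1 := by omega
    rw [this]; ring

-- ===== VERDICT (by name: the statement is the Claim_ definition above) =====
theorem my_sub_spec : Claim_equal_my_sub := by
  intro a b _
  unfold Spec_my_sub my_sub my_sub_alt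
  simp only []
  rw [mySubLoop_eq ((max a b - min a b).toNat) _ _ _ _ rfl]
  rcases lt_trichotomy a b with h | h | h
  · have : ¬ a > b := by omega
    simp [this, le_of_lt h]
  · subst h; simp
  · simp [h, le_of_lt h]
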